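-- pv_equiv track=rewrite | github.com/eeue56/pycho | pycho/core/blocking.py | into_ordered_dict
-- ===== SOURCE A (Python) =====
-- from collections import OrderedDict
--
-- def into_ordered_dict(blocklist):
--     """ Puts the blocklist into an ordered dict """
--     into_dict = OrderedDict()
--
--     for block in blocklist:
--         x, y, color = block
--         if y not in into_dict:
--             into_dict[y] = OrderedDict()
--         into_dict[y][x] = color
--
--     out = OrderedDict()
--
--     for y in sorted(into_dict):
--         out[y] = OrderedDict()
--         for x in sorted(into_dict[y]):
--             out[y][x] = into_dict[y][x]
--     return out
-- ===== SOURCE B (Python) =====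
-- from collections import OrderedDict
--
--
-- def into_ordered_dict(blocklist):
--     """ Puts the blocklist into an ordered dict """
--     # last write wins per cell: a flat dict keyed by (x, y)
--     flat = {}
--     for x, y, color in blocklist:
--         flat[(x, y)] = color
--
--     # one global sort by (y, x); keys are unique, so no tie-breaking is involved
--     cells = sorted(flat.items(), key=lambda item: (item[0][1], item[0][0]))
--
--     # cells arrive grouped by y with x ascending: a single linear emit pass
--     out = OrderedDict()
--     for (x, y), color in cells:
--         if y not in out:
--             out[y] = OrderedDict()
--         out[y][x] = color
--     return out
-- ===== Notes on version B (the rewrite author's own statement) =====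
-- stated objective: alternative
-- what changed: A groups blocks into a nested dict-of-dicts and then walks it with nested per-row sorting passes; B collapses the blocklist into a flat dict keyed by (x, y) (last color wins), does one global sort of the unique cells by (y, x), and emits the nested OrderedDict in a single linear pass.
import Mathlib
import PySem

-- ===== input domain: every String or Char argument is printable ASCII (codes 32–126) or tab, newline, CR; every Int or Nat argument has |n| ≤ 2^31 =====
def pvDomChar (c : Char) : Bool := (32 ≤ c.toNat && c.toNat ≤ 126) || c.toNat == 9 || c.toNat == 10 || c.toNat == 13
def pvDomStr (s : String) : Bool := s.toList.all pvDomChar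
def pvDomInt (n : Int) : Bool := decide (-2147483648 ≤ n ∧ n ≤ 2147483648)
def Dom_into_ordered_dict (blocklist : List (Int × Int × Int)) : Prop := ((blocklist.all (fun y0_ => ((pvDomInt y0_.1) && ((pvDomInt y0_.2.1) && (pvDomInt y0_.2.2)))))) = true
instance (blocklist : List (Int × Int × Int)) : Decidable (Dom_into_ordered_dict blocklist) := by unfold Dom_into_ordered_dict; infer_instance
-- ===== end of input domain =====

-- B replaces A's nested dict-of-dicts grouping plus per-row sorting passes by a flat
-- dict keyed by (x, y), one global sort by (y, x), and a single linear emit pass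
-- (objective: alternative; same return value everywhere).

-- ===== PORT A =====
-- into_dict = OrderedDict(); for block: x, y, color = block; if y not in into_dict: into_dict[y] = {}; into_dict[y][x] = color
-- out = OrderedDict(); for y in sorted(into_dict): out[y] = {}; for x in sorted(into_dict[y]): out[y][x] = into_dict[y][x]
def into_ordered_dict (blocklist : List (Int × Int × Int)) : List (Int × List (Int × Int)) :=
  let into_dict : PySem.Dict Int (PySem.Dict Int Int) :=
    blocklist.foldl (fun d b =>
      let d := if d.contains b.2.1 then d else d.insert b.2.1 PySem.Dict.empty
      d.insert b.2.1 ((d.getD b.2.1 PySem.Dict.empty).insert b.1 b.2.2)) PySem.Dict.empty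
  let out : PySem.Dict Int (PySem.Dict Int Int) :=
    (PySem.List.sorted into_dict.keys (fun k => k) false).foldl (fun out y =>
      let inner := into_dict.getD y PySem.Dict.empty
      let out := out.insert y PySem.Dict.empty
      (PySem.List.sorted inner.keys (fun k => k) false).foldl (fun o x =>
        o.insert y ((o.getD y PySem.Dict.empty).insert x (inner.getD x 0))) out) PySem.Dict.empty
  out.items.map (fun p => (p.1, p.2.items))

-- ===== PORT B =====
-- flat = {}; for x, y, color: flat[(x, y)] = color
-- cells = sorted(flat.items(), key=lambda item: (item[0][1], item[0][0]))
-- out = OrderedDict(); for (x, y), color in cells: if y not in out: out[y] = {}; out[y][x] = color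
def into_ordered_dict_alt (blocklist : List (Int × Int × Int)) : List (Int × List (Int × Int)) :=
  let flat : PySem.Dict (Int × Int) Int :=
    blocklist.foldl (fun d b => d.insert (b.1, b.2.1) b.2.2) PySem.Dict.empty
  let cells := PySem.List.sorted2 flat.items (fun item => item.1.2) (fun item => item.1.1) false
  let out : PySem.Dict Int (PySem.Dict Int Int) :=
    cells.foldl (fun d c =>
      let d := if d.contains c.1.2 then d else d.insert c.1.2 PySem.Dict.empty
      d.insert c.1.2 ((d.getD c.1.2 PySem.Dict.empty).insert c.1.1 c.2)) PySem.Dict.empty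
  out.items.map (fun p => (p.1, p.2.items))

-- ===== PRECONDITION & SPEC =====
def Spec_into_ordered_dict (blocklist : List (Int × Int × Int)) (out : List (Int × List (Int × Int))) : Prop := out = into_ordered_dict_alt blocklist
instance (blocklist : List (Int × Int × Int)) (out : List (Int × List (Int × Int))) : Decidable (Spec_into_ordered_dict blocklist out) := by unfold Spec_into_ordered_dict; infer_instance

-- ===== CLAIM (what is proved, stated in full; the proofs are below) =====
def Claim_equal_into_ordered_dict : Prop := ∀ (blocklist : List (Int × Int × Int)), Dom_into_ordered_dict blocklist → Spec_into_ordered_dict blocklist (into_ordered_dict blocklist)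

-- ===== LEMMAS AND PROOFS =====

-- the last color written for cell (x, y), default 0 (never used at live cells)
def pvLcv (bl : List (Int × Int × Int)) (x y : Int) : Int :=
  ((bl.filter (fun b => b.1 == x && b.2.1 == y)).map (fun b => b.2.2)).getLastD 0

def pvYs (bl : List (Int × Int × Int)) : List Int :=
  PySem.List.sorted (PySem.Set.ofList (bl.map (fun b => b.2.1))) (fun k => k) false

def pvXs (bl : List (Int × Int × Int)) (y : Int) : List Int :=
  PySem.List.sorted (PySem.Set.ofList ((bl.filter (fun b => b.2.1 == y)).map (fun b => b.1))) (fun k => k) false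

-- the common normal form of both programs
def pvNested (bl : List (Int × Int × Int)) : List (Int × List (Int × Int)) :=
  (pvYs bl).map (fun y => (y, (pvXs bl y).map (fun x => (x, pvLcv bl x y))))

-- 'if y not in d: d[y] = {}' followed by 'd[y][x] = c' is a single nested insert
theorem pv_step_if (d : PySem.Dict Int (PySem.Dict Int Int)) (k x c : Int) :
    (let d' := if d.contains k then d else d.insert k PySem.Dict.empty
     d'.insert k ((d'.getD k PySem.Dict.empty).insert x c))
    = d.insert k ((d.getD k PySem.Dict.empty).insert x c) := by
  show (if d.contains k then d else d.insert k PySem.Dict.empty).insert k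
      (((if d.contains k then d else d.insert k PySem.Dict.empty).getD k PySem.Dict.empty).insert x c)
    = d.insert k ((d.getD k PySem.Dict.empty).insert x c)
  by_cases h : d.contains k = true
  · rw [if_pos h]
  · rw [if_neg h, PySem.Dict.getD_insert_self, PySem.Dict.insert_insert_self,
      PySem.Dict.getD_of_not_contains d _ (eq_false_of_ne_true h)]

-- an insert-fold looked up afterwards: the LAST value written at that key
theorem pv_getD_foldl_ins {κ ν : Type} [BEq κ] [LawfulBEq κ] [DecidableEq κ] {β : Type}
    (key : β → κ) (val : β → ν) (l : List β) (d : PySem.Dict κ ν) (k : κ) (v0 : ν) :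
    (l.foldl (fun d b => d.insert (key b) (val b)) d).getD k v0
    = ((l.filter (fun b => key b == k)).map val).getLastD (d.getD k v0) := by
  induction l generalizing d with
  | nil => rfl
  | cons b t ih =>
    rw [List.foldl_cons, ih, PySem.Dict.getD_insert, List.filter_cons]
    by_cases h : k = key b
    · have hb : (key b == k) = true := by simp [h]
      rw [if_pos h, hb, if_pos rfl, List.map_cons, List.getLastD_cons]
    · have hb : (key b == k) = false := beq_eq_false_iff_ne.mpr (fun he => h he.symm)
      rw [if_neg h, hb]
      simp

-- the grouping fold of A, looked up at y: an insert-fold over y's own blocks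
theorem pv_build_getD (l : List (Int × Int × Int)) (d : PySem.Dict Int (PySem.Dict Int Int)) (y : Int) :
    (l.foldl (fun d b => d.insert b.2.1 ((d.getD b.2.1 PySem.Dict.empty).insert b.1 b.2.2)) d).getD y PySem.Dict.empty
    = (l.filter (fun b => b.2.1 == y)).foldl (fun i b => i.insert b.1 b.2.2) (d.getD y PySem.Dict.empty) := by
  induction l generalizing d with
  | nil => rfl
  | cons b t ih =>
    rw [List.foldl_cons, ih, PySem.Dict.getD_insert, List.filter_cons]
    by_cases h : y = b.2.1
    · have hb : (b.2.1 == y) = true := by simp [h]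
      rw [if_pos h, hb, if_pos rfl, List.foldl_cons, h]
    · have hb : (b.2.1 == y) = false := beq_eq_false_iff_ne.mpr (Ne.symm h)
      rw [if_neg h, hb]
      simp

-- a run of writes 'o[y][x] = c' at one y, starting from an o that already holds y
theorem pv_run (row : List (Int × Int)) (y : Int)
    (i0 : PySem.Dict Int Int) (out : PySem.Dict Int (PySem.Dict Int Int)) :
    row.foldl (fun o p => o.insert y ((o.getD y PySem.Dict.empty).insert p.1 p.2)) (out.insert y i0)
    = out.insert y (row.foldl (fun i p => i.insert p.1 p.2) i0) := by
  induction row generalizing i0 with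
  | nil => rfl
  | cons p t ih =>
    simp only [List.foldl_cons]
    rw [PySem.Dict.getD_insert_self, PySem.Dict.insert_insert_self, ih]

-- the emit pass of B over cells grouped by y (fresh, distinct ys)
theorem pv_emit_flatMap (ys : List Int) (rows : Int → List (Int × Int))
    (d : PySem.Dict Int (PySem.Dict Int Int))
    (hnd : ys.Nodup) (hc : ∀ y ∈ ys, d.contains y = false) (hne : ∀ y ∈ ys, rows y ≠ []) :
    (ys.flatMap (fun y => (rows y).map (fun p => ((p.1, y), p.2)))).foldl
        (fun d c => d.insert c.1.2 ((d.getD c.1.2 PySem.Dict.empty).insert c.1.1 c.2)) d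
    = ys.foldl (fun d y => d.insert y ((rows y).foldl (fun i p => i.insert p.1 p.2) PySem.Dict.empty)) d := by
  induction ys generalizing d with
  | nil => rfl
  | cons y t ih =>
    simp only [List.flatMap_cons, List.foldl_append, List.foldl_cons]
    have hy : d.contains y = false := hc y (by simp)
    obtain ⟨p, r, hrow⟩ : ∃ p r, rows y = p :: r := by
      cases h : rows y with
      | nil => exact absurd h (hne y (by simp))
      | cons p r => exact ⟨p, r, rfl⟩
    have hblock :
        ((rows y).map (fun p => ((p.1, y), p.2))).foldl
          (fun d c => d.insert c.1.2 ((d.getD c.1.2 PySem.Dict.empty).insert c.1.1 c.2)) d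
        = d.insert y ((rows y).foldl (fun i p => i.insert p.1 p.2) PySem.Dict.empty) := by
      rw [hrow]
      simp only [List.map_cons, List.foldl_cons]
      rw [PySem.Dict.getD_of_not_contains d _ hy]
      rw [List.foldl_map]
      exact pv_run r y (PySem.Dict.empty.insert p.1 p.2) d
    rw [hblock, ih]
    · exact hnd.of_cons
    · intro y' hy'
      rw [PySem.Dict.contains_insert]
      have : (y' == y) = false := by
        simp only [beq_eq_false_iff_ne, ne_eq]
        exact fun h => (List.nodup_cons.mp hnd).1 (h ▸ hy')
      rw [this, Bool.false_or]
      exact hc y' (List.mem_cons_of_mem _ hy')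
    · exact fun y' hy' => hne y' (List.mem_cons_of_mem _ hy')

-- sorted2 with two keys IS sorted with the lexicographic key
theorem pv_sorted2_eq_sorted_lex (xs : List ((Int × Int) × Int))
    (k1 k2 : (Int × Int) × Int → Int) :
    PySem.List.sorted2 xs k1 k2 false
    = PySem.List.sorted xs (fun a => toLex (k1 a, k2 a)) false := by
  show xs.foldl (fun acc x => PySem.List.insertBy _ x acc) [] = xs.foldl (fun acc x => PySem.List.insertBy _ x acc) []
  congr 1
  funext acc x
  congr 1
  funext a b
  show (decide (k1 a < k1 b) || !decide (k1 b < k1 a) && decide (k2 a < k2 b))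
      = decide (toLex (k1 a, k2 a) < toLex (k1 b, k2 b))
  have hiff : (toLex (k1 a, k2 a) < toLex (k1 b, k2 b)) ↔ (k1 a < k1 b ∨ (k1 a = k1 b ∧ k2 a < k2 b)) :=
    Prod.Lex.lt_iff
  by_cases h1 : k1 a < k1 b
  · have ht : toLex (k1 a, k2 a) < toLex (k1 b, k2 b) := hiff.mpr (Or.inl h1)
    simp [h1, ht]
  · by_cases h2 : k1 b < k1 a
    · have ht : ¬ toLex (k1 a, k2 a) < toLex (k1 b, k2 b) := fun hc => by
        rcases hiff.mp hc with h | ⟨h, _⟩ <;> omega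
      simp [h1, h2, ht]
    · have he : k1 a = k1 b := by omega
      by_cases h3 : k2 a < k2 b
      · have ht : toLex (k1 a, k2 a) < toLex (k1 b, k2 b) := hiff.mpr (Or.inr ⟨he, h3⟩)
        simp [h1, h2, h3, ht]
      · have ht : ¬ toLex (k1 a, k2 a) < toLex (k1 b, k2 b) := fun hc => by
          rcases hiff.mp hc with h | ⟨_, h⟩ <;> omega
        simp [h1, h2, h3, ht]

-- A's grouping dict, looked up at y
def pvInner (bl : List (Int × Int × Int)) (y : Int) : PySem.Dict Int Int :=
  (bl.filter (fun b => b.2.1 == y)).foldl (fun i b => i.insert b.1 b.2.2) PySem.Dict.empty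

theorem pv_ys_nodup (bl : List (Int × Int × Int)) : (pvYs bl).Nodup :=
  (PySem.List.sorted_perm _ _ _).symm.nodup (PySem.Set.nodup_ofList _)

theorem pv_xs_nodup (bl : List (Int × Int × Int)) (y : Int) : (pvXs bl y).Nodup :=
  (PySem.List.sorted_perm _ _ _).symm.nodup (PySem.Set.nodup_ofList _)

theorem pv_inner_getD (bl : List (Int × Int × Int)) (y x : Int) :
    (pvInner bl y).getD x 0 = pvLcv bl x y := by
  unfold pvInner
  refine Eq.trans (pv_getD_foldl_ins (fun (b : Int × Int × Int) => b.1) (fun b => b.2.2) _ PySem.Dict.empty x 0) ?_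
  rw [PySem.Dict.getD_empty, List.filter_filter]
  rfl

theorem pv_inner_keys (bl : List (Int × Int × Int)) (y : Int) :
    (pvInner bl y).keys = PySem.Set.ofList ((bl.filter (fun b => b.2.1 == y)).map (fun b => b.1)) := by
  unfold pvInner
  exact (PySem.Dict.keys_foldl_insert_key (ν := Int) _ (fun (b : Int × Int × Int) => b.1) (fun _ b => b.2.2) PySem.Dict.empty).trans
    (by rw [PySem.Dict.keys_empty, PySem.Set.update_nil_left])

-- the row value both programs build for a live y
theorem pv_row_items (bl : List (Int × Int × Int)) (y : Int) (g : Int → Int)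
    (hg : ∀ x, g x = pvLcv bl x y) :
    (((pvXs bl y).map (fun x => (x, g x))).foldl (fun i p => i.insert p.1 p.2)
        (PySem.Dict.empty : PySem.Dict Int Int)).items
    = (pvXs bl y).map (fun x => (x, pvLcv bl x y)) := by
  rw [List.foldl_map,
    PySem.Dict.items_foldl_insert_fresh (pvXs bl y) (fun x => x) (fun x => g x) PySem.Dict.empty
      (fun _ _ => PySem.Dict.contains_empty _) (by simpa using pv_xs_nodup bl y)]
  simp only [PySem.Dict.empty, List.nil_append]
  exact List.map_congr_left (fun x _ => by rw [hg])

theorem pv_A_eq_nested (bl : List (Int × Int × Int)) : into_ordered_dict bl = pvNested bl := by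
  have hbody : (fun (d : PySem.Dict Int (PySem.Dict Int Int)) (b : Int × Int × Int) =>
      let d' := if d.contains b.2.1 then d else d.insert b.2.1 PySem.Dict.empty
      d'.insert b.2.1 ((d'.getD b.2.1 PySem.Dict.empty).insert b.1 b.2.2))
      = fun d b => d.insert b.2.1 ((d.getD b.2.1 PySem.Dict.empty).insert b.1 b.2.2) := by
    funext d b
    exact pv_step_if d b.2.1 b.1 b.2.2
  simp only [into_ordered_dict, hbody]
  have hkeys : (bl.foldl (fun d b => d.insert b.2.1 ((d.getD b.2.1 PySem.Dict.empty).insert b.1 b.2.2)) PySem.Dict.empty).keys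
      = PySem.Set.ofList (bl.map (fun b => b.2.1)) := by
    rw [PySem.Dict.keys_foldl_insert_key bl (fun b => b.2.1)
        (fun d b => (d.getD b.2.1 PySem.Dict.empty).insert b.1 b.2.2) PySem.Dict.empty,
      PySem.Dict.keys_empty, PySem.Set.update_nil_left]
  have hinner : ∀ y : Int, (bl.foldl (fun d b => d.insert b.2.1 ((d.getD b.2.1 PySem.Dict.empty).insert b.1 b.2.2)) PySem.Dict.empty).getD y PySem.Dict.empty
      = pvInner bl y := by
    intro y
    rw [pv_build_getD, PySem.Dict.getD_empty]
    rfl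
  rw [hkeys]
  simp only [hinner]
  have houter : (fun (out : PySem.Dict Int (PySem.Dict Int Int)) (y : Int) =>
      (PySem.List.sorted (pvInner bl y).keys (fun k => k) false).foldl
        (fun o x => o.insert y ((o.getD y PySem.Dict.empty).insert x ((pvInner bl y).getD x 0)))
        (out.insert y PySem.Dict.empty))
      = fun out y => out.insert y
          (((PySem.List.sorted (pvInner bl y).keys (fun k => k) false).map
              (fun x => (x, (pvInner bl y).getD x 0))).foldl
            (fun i p => i.insert p.1 p.2) PySem.Dict.empty) := by
    funext out y
    have := pv_run ((PySem.List.sorted (pvInner bl y).keys (fun k => k) false).map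
      (fun x => (x, (pvInner bl y).getD x 0))) y PySem.Dict.empty out
    rw [List.foldl_map] at this
    exact this
  rw [houter]
  rw [PySem.Dict.items_foldl_insert_fresh
      (PySem.List.sorted (PySem.Set.ofList (bl.map (fun b => b.2.1))) (fun k => k) false)
      (fun y => y) _ PySem.Dict.empty (fun _ _ => PySem.Dict.contains_empty _)
      (by simpa using pv_ys_nodup bl)]
  simp only [PySem.Dict.empty, List.nil_append, List.map_map]
  refine List.map_congr_left (fun y _ => ?_)
  simp only [Function.comp]
  refine Prod.ext rfl ?_
  show (((PySem.List.sorted (pvInner bl y).keys (fun k => k) false).map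
      (fun x => (x, (pvInner bl y).getD x 0))).foldl (fun i p => i.insert p.1 p.2)
      PySem.Dict.empty).items = _
  have hxs : PySem.List.sorted (pvInner bl y).keys (fun k => k) false = pvXs bl y := by
    rw [pv_inner_keys]
    rfl
  rw [hxs]
  exact pv_row_items bl y _ (fun x => pv_inner_getD bl y x)

-- the sorted cell list of B, named: blocks of constant y, x increasing inside
def pvCells (bl : List (Int × Int × Int)) : List ((Int × Int) × Int) :=
  (pvYs bl).flatMap (fun y => (pvXs bl y).map (fun x => ((x, y), pvLcv bl x y)))

theorem pv_cells_pairwise (bl : List (Int × Int × Int)) :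
    (pvCells bl).Pairwise (fun a b => toLex (a.1.2, a.1.1) < toLex (b.1.2, b.1.1)) := by
  unfold pvCells
  rw [List.pairwise_flatMap]
  constructor
  · intro y _
    rw [List.pairwise_map]
    refine (PySem.List.sorted_ofList_pairwise_lt _).imp ?_
    intro a b h
    exact Prod.Lex.lt_iff.mpr (Or.inr ⟨rfl, h⟩)
  · refine (PySem.List.sorted_ofList_pairwise_lt _).imp ?_
    intro y y' h c hc c' hc'
    simp only [List.mem_map] at hc hc'
    obtain ⟨x, _, rfl⟩ := hc
    obtain ⟨x', _, rfl⟩ := hc'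
    exact Prod.Lex.lt_iff.mpr (Or.inl h)

theorem pv_cells_perm (bl : List (Int × Int × Int)) :
    (pvCells bl).Perm ((PySem.Set.ofList (bl.map (fun b => (b.1, b.2.1)))).map
      (fun k => (k, pvLcv bl k.1 k.2))) := by
  have hK : pvCells bl = ((pvYs bl).flatMap (fun y => (pvXs bl y).map (fun x => (x, y)))).map
      (fun k => (k, pvLcv bl k.1 k.2)) := by
    rw [List.map_flatMap]
    unfold pvCells
    refine congrArg (fun f => List.flatMap f (pvYs bl)) (funext fun y => ?_)
    rw [List.map_map]
    rfl
  rw [hK]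
  refine List.Perm.map _ ?_
  have hnK : ((pvYs bl).flatMap (fun y => (pvXs bl y).map (fun x => (x, y)))).Nodup := by
    have hp := pv_cells_pairwise bl
    rw [hK] at hp
    have hmapnd : (((pvYs bl).flatMap (fun y => (pvXs bl y).map (fun x => (x, y)))).map
        (fun k => (k, pvLcv bl k.1 k.2))).Nodup :=
      hp.imp (fun h heq => by subst heq; exact lt_irrefl _ h)
    exact List.Nodup.of_map _ hmapnd
  refine (List.perm_ext_iff_of_nodup hnK (PySem.Set.nodup_ofList _)).mpr (fun p => ?_)
  simp only [List.mem_flatMap, List.mem_map, PySem.Set.mem_ofList, pvYs, pvXs,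
    PySem.List.mem_sorted, List.mem_filter]
  constructor
  · rintro ⟨y, _, x, hx, rfl⟩
    obtain ⟨b, ⟨hb, hby⟩, rfl⟩ := hx
    exact ⟨b, hb, by rw [eq_of_beq hby]⟩
  · rintro ⟨b, hb, rfl⟩
    exact ⟨b.2.1, ⟨b, hb, rfl⟩, b.1, ⟨b, ⟨hb, BEq.rfl⟩, rfl⟩, rfl⟩

theorem pv_xs_ne_nil (bl : List (Int × Int × Int)) (y : Int) (hy : y ∈ pvYs bl) :
    pvXs bl y ≠ [] := by
  intro hnil
  unfold pvXs at hnil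
  rw [PySem.List.sorted_eq_nil_iff] at hnil
  simp only [pvYs, PySem.List.mem_sorted, PySem.Set.mem_ofList, List.mem_map] at hy
  obtain ⟨b, hb, rfl⟩ := hy
  have : b.1 ∈ (PySem.Set.ofList ((bl.filter (fun b' => b'.2.1 == b.2.1)).map (fun b => b.1)) : List Int) := by
    rw [PySem.Set.mem_ofList]
    exact List.mem_map.mpr ⟨b, List.mem_filter.mpr ⟨hb, BEq.rfl⟩, rfl⟩
  rw [hnil] at this
  simp at this

theorem pv_B_eq_nested (bl : List (Int × Int × Int)) : into_ordered_dict_alt bl = pvNested bl := by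
  have hbody : (fun (d : PySem.Dict Int (PySem.Dict Int Int)) (c : (Int × Int) × Int) =>
      let d' := if d.contains c.1.2 then d else d.insert c.1.2 PySem.Dict.empty
      d'.insert c.1.2 ((d'.getD c.1.2 PySem.Dict.empty).insert c.1.1 c.2))
      = fun d c => d.insert c.1.2 ((d.getD c.1.2 PySem.Dict.empty).insert c.1.1 c.2) := by
    funext d c
    exact pv_step_if d c.1.2 c.1.1 c.2
  simp only [into_ordered_dict_alt, hbody]
  -- the flat dict: distinct live cells in first-write order, each with its last color
  have hnd : (bl.foldl (fun d b => d.insert (b.1, b.2.1) b.2.2) PySem.Dict.empty).keys.Nodup := by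
    have := PySem.Dict.nodup_keys_foldl_insert_key bl (fun b => (b.1, b.2.1)) (fun _ b => b.2.2)
      PySem.Dict.empty PySem.Dict.nodup_keys_empty
    exact this
  have hitems : (bl.foldl (fun d b => d.insert (b.1, b.2.1) b.2.2) PySem.Dict.empty).items
      = (PySem.Set.ofList (bl.map (fun b => (b.1, b.2.1)))).map (fun k => (k, pvLcv bl k.1 k.2)) := by
    rw [PySem.Dict.items_eq_map_keys _ hnd 0,
      PySem.Dict.keys_foldl_insert_key bl (fun b => (b.1, b.2.1)) (fun _ b => b.2.2) PySem.Dict.empty,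
      PySem.Dict.keys_empty, PySem.Set.update_nil_left]
    refine List.map_congr_left (fun k _ => ?_)
    obtain ⟨kx, ky⟩ := k
    refine Prod.ext rfl ?_
    refine Eq.trans (pv_getD_foldl_ins (fun (b : Int × Int × Int) => (b.1, b.2.1)) (fun b => b.2.2) bl
      PySem.Dict.empty (kx, ky) 0) ?_
    rw [PySem.Dict.getD_empty]
    rfl
  -- sorting those unique cells by (y, x) yields exactly the nested enumeration
  have hcells : PySem.List.sorted2
      (bl.foldl (fun d b => d.insert (b.1, b.2.1) b.2.2) PySem.Dict.empty).items
      (fun item => item.1.2) (fun item => item.1.1) false = pvCells bl := by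
    rw [pv_sorted2_eq_sorted_lex, hitems]
    exact PySem.List.sorted_eq_of_perm_of_pairwise_lt _ _ _
      (pv_cells_perm bl) (pv_cells_pairwise bl)
  rw [hcells]
  -- the emit pass over the grouped cells
  have hblocks : pvCells bl = (pvYs bl).flatMap (fun y =>
      (((pvXs bl y).map (fun x => (x, pvLcv bl x y)))).map (fun p => ((p.1, y), p.2))) := by
    unfold pvCells
    refine congrArg (fun f => List.flatMap f (pvYs bl)) (funext fun y => ?_)
    rw [List.map_map]
    rfl
  rw [hblocks,
    pv_emit_flatMap (pvYs bl) (fun y => (pvXs bl y).map (fun x => (x, pvLcv bl x y)))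
      PySem.Dict.empty (pv_ys_nodup bl) (fun _ _ => PySem.Dict.contains_empty _)
      (fun y hy => by
        rw [ne_eq, List.map_eq_nil_iff]
        exact pv_xs_ne_nil bl y hy)]
  rw [PySem.Dict.items_foldl_insert_fresh (pvYs bl) (fun y => y) _ PySem.Dict.empty
      (fun _ _ => PySem.Dict.contains_empty _) (by simpa using pv_ys_nodup bl)]
  simp only [PySem.Dict.empty, List.nil_append, List.map_map]
  refine List.map_congr_left (fun y _ => ?_)
  simp only [Function.comp]
  exact Prod.ext rfl (pv_row_items bl y _ (fun _ => rfl))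


-- ===== VERDICT (by name: the statement is the Claim_ definition above) =====
theorem into_ordered_dict_spec : Claim_equal_into_ordered_dict := by
  intro bl _
  show into_ordered_dict bl = into_ordered_dict_alt bl
  rw [pv_A_eq_nested, pv_B_eq_nested]
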